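-- pv_equiv track=rewrite | github.com/Tomy32/medical-saas-ai | rag.py | triage_level
-- ===== SOURCE A (Python) =====
-- def triage_level(text: str) -> str:
--     text = text.lower()
--
--     if any(k in text for k in [
--         "respiratory distress", "seizure", "stroke",
--         "shock", "ventilator", "sepsis", "critical"
--     ]):
--         return "HIGH"
--
--     if any(k in text for k in [
--         "chest pain", "hypertension", "high blood pressure",
--         "shortness of breath"
--     ]):
--         return "MEDIUM"
--
--     return "LOW"
-- ===== SOURCE B (Python) =====
-- _RANKED = {
--     "respiratory distress": 2, "seizure": 2, "stroke": 2, "shock": 2,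
--     "ventilator": 2, "sepsis": 2, "critical": 2,
--     "chest pain": 1, "hypertension": 1, "high blood pressure": 1,
--     "shortness of breath": 1,
-- }
-- _LABELS = ["LOW", "MEDIUM", "HIGH"]
--
-- def triage_level(text: str) -> str:
--     t = text.lower()
--     rank = 0
--     for kw, r in _RANKED.items():
--         if kw in t:
--             rank = max(rank, r)
--     return _LABELS[rank]
-- ===== Notes on version B (the rewrite author's own statement) =====
-- stated objective: alternative
-- what changed: Replaces the two ordered short-circuiting any()-tier checks with a single keyword->rank table scanned once accumulating the maximum matched rank, translated back to a label by list indexing.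
import Mathlib
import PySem

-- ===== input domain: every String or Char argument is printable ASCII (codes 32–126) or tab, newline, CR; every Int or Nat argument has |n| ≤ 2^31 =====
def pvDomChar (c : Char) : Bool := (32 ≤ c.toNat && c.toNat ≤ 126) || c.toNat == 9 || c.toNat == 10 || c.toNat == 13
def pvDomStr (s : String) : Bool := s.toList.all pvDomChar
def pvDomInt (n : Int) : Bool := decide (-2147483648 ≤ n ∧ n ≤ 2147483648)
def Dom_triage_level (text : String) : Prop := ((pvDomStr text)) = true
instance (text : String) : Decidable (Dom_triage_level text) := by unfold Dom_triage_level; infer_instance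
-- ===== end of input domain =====

-- B replaces A's two ordered any()-tier checks with one keyword→rank table folded to a max rank, then a label lookup (objective: alternative decomposition).

-- ===== PORT A =====
def triage_level (text : String) : String :=
  let text := PySem.Str.lower text
  if ["respiratory distress", "seizure", "stroke",
      "shock", "ventilator", "sepsis", "critical"].any
      (fun k => PySem.Str.isIn k text) then "HIGH"
  else if ["chest pain", "hypertension", "high blood pressure",
           "shortness of breath"].any
      (fun k => PySem.Str.isIn k text) then "MEDIUM"
  else "LOW"

-- ===== PORT B =====
def triageRanked : List (String × Nat) :=
  [("respiratory distress", 2), ("seizure", 2), ("stroke", 2), ("shock", 2),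
   ("ventilator", 2), ("sepsis", 2), ("critical", 2),
   ("chest pain", 1), ("hypertension", 1), ("high blood pressure", 1),
   ("shortness of breath", 1)]

def triageLabels : List String := ["LOW", "MEDIUM", "HIGH"]

def triage_level_alt (text : String) : String :=
  let t := PySem.Str.lower text
  let rank := triageRanked.foldl
    (fun acc p => if PySem.Str.isIn p.1 t then max acc p.2 else acc) 0
  -- _LABELS[rank]: rank ∈ {0,1,2} is always in range, so pyGet? is some
  (PySem.List.pyGet? triageLabels (rank : Int)).getD "LOW"

-- ===== PRECONDITION & SPEC =====
def Spec_triage_level (text : String) (out : String) : Prop := out = triage_level_alt text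
instance (text : String) (out : String) : Decidable (Spec_triage_level text out) := by unfold Spec_triage_level; infer_instance

-- ===== CLAIM (what is proved, stated in full; the proofs are below) =====
def Claim_equal_triage_level : Prop := ∀ (text : String), Dom_triage_level text → Spec_triage_level text (triage_level text)

-- ===== LEMMAS AND PROOFS =====

-- ===== VERDICT (by name: the statement is the Claim_ definition above) =====
theorem triage_level_spec : Claim_equal_triage_level := by
  intro text _
  unfold Spec_triage_level triage_level triage_level_alt triageRanked triageLabels
  simp only [List.any_cons, List.any_nil, List.foldl_cons, List.foldl_nil, Bool.or_false]
  generalize PySem.Str.isIn "respiratory distress" (PySem.Str.lower text) = b1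
  generalize PySem.Str.isIn "seizure" (PySem.Str.lower text) = b2
  generalize PySem.Str.isIn "stroke" (PySem.Str.lower text) = b3
  generalize PySem.Str.isIn "shock" (PySem.Str.lower text) = b4
  generalize PySem.Str.isIn "ventilator" (PySem.Str.lower text) = b5
  generalize PySem.Str.isIn "sepsis" (PySem.Str.lower text) = b6
  generalize PySem.Str.isIn "critical" (PySem.Str.lower text) = b7
  generalize PySem.Str.isIn "chest pain" (PySem.Str.lower text) = c1
  generalize PySem.Str.isIn "hypertension" (PySem.Str.lower text) = c2
  generalize PySem.Str.isIn "high blood pressure" (PySem.Str.lower text) = c3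
  generalize PySem.Str.isIn "shortness of breath" (PySem.Str.lower text) = c4
  revert b1 b2 b3 b4 b5 b6 b7 c1 c2 c3 c4
  decide
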